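-- pv_equiv track=rewrite | github.com/Arsen1302/Code-copy-detector | TestData/solutions/problem_679_5.py | solution_679_5
-- ===== SOURCE A (Python) =====
-- from typing import List
--
-- def solution_679_5(board: List[List[str]]) -> int:
--     res=0
--     n_row=len(board)
--     n_col=len(board[0])
--     dirs=[[0,1],[0,-1],[-1,0],[1,0]]
--     for i in range(n_row):
--         for j in range(n_col):
--             if board[i][j]=="R":
--                 for dir in dirs:
--                     cur_r=i
--                     cur_c=j
--                     while 0<=cur_r<n_row and 0<=cur_c<n_col:
--                         if board[cur_r][cur_c]=='B':
--                             break
--                         if board[cur_r][cur_c]=="p":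
--                             res+=1
--                             break
--                         cur_r+=dir[0]
--                         cur_c+=dir[1]
--                 return res
--     return 0
-- ===== SOURCE B (Python) =====
-- from typing import List
--
-- def solution_679_5(board: List[List[str]]) -> int:
--     def hit_first(seg):  # nearest piece scanning away from the rook
--         pieces = [x for x in seg if x in ("B", "p")]
--         return 1 if pieces and pieces[0] == "p" else 0
--
--     def hit_last(seg):   # nearest piece scanning toward the rook
--         pieces = [x for x in seg if x in ("B", "p")]
--         return 1 if pieces and pieces[-1] == "p" else 0
--
--     for r, row in enumerate(board):
--         for c in range(len(board[0])):
--             if row[c] == "R":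
--                 col = [brow[c] for brow in board]
--                 return (hit_first(row[c+1:]) + hit_last(row[:c])
--                         + hit_first(col[r+1:]) + hit_last(col[:r]))
--     return 0
-- ===== Notes on version B (the rewrite author's own statement) =====
-- stated objective: alternative
-- what changed: Instead of stepping cell-by-cell in four directions with while-loops, B materialises the rook's row and column, slices each into the two segments beside the rook, filters each segment down to the pieces ('B'/'p') and checks the piece nearest the rook.
-- outside the precondition, e.g. on solution_679_5([['R', 'p'], ['x']]): A returns 1, B returns 1; on solution_679_5([['x'], ['R', 'p']]): A returns 0, B returns 1
import Mathlib
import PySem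

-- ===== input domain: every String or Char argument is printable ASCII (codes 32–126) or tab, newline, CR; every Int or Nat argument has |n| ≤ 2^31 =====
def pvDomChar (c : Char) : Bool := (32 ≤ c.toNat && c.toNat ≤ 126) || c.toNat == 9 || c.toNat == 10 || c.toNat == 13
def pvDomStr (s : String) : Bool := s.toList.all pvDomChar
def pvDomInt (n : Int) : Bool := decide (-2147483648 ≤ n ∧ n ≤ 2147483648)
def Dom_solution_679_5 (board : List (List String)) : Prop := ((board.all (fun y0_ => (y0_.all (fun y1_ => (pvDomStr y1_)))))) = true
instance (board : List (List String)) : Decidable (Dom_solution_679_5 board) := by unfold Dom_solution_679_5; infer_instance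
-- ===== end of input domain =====

-- B replaces A's four cell-by-cell directional while-loops by slicing the rook's row/column and
-- filtering each slice down to its pieces (objective: alternative decomposition, same cost).
-- Equivalence is about the return value; neither program mutates its argument.

-- ===== PORT A =====
-- board[r][c]; every caller first checks 0 ≤ r < n_row and 0 ≤ c < n_col, so on the
-- rectangular boards admitted by Pre_ the getD defaults are never taken (exact there).
def pvCellA (board : List (List String)) (r c : Int) : String :=
  (board.getD r.toNat []).getD c.toNat ""

-- the `while 0<=cur_r<n_row and 0<=cur_c<n_col` loop; fuel bounds the iteration count
-- (for the unit directions used, n_row+n_col+1 steps always suffice, so this is exact)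
def pvWalkA (board : List (List String)) (nRow nCol dr dc : Int) :
    Nat → Int → Int → Int → Int
  | 0, _, _, res => res
  | fuel+1, r, c, res =>
    if 0 ≤ r ∧ r < nRow ∧ 0 ≤ c ∧ c < nCol then
      if pvCellA board r c = "B" then res
      else if pvCellA board r c = "p" then res + 1
      else pvWalkA board nRow nCol dr dc fuel (r+dr) (c+dc) res
    else res

-- `for dir in dirs: … ; return res`
def pvDirsA (board : List (List String)) (nRow nCol i j : Int) : Int :=
  [((0:Int),(1:Int)), (0,-1), (-1,0), (1,0)].foldl
    (fun res d => pvWalkA board nRow nCol d.1 d.2 ((nRow+nCol).toNat+1) i j res) 0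

-- `for j in range(n_col): if board[i][j]=="R": return res`
def pvColsA (board : List (List String)) (nRow nCol i : Int) : Nat → Int → Option Int
  | 0, _ => none
  | fuel+1, j =>
    if pvCellA board i j = "R" then some (pvDirsA board nRow nCol i j)
    else pvColsA board nRow nCol i fuel (j+1)

-- `for i in range(n_row): …`
def pvRowsA (board : List (List String)) (nRow nCol : Int) : Nat → Int → Option Int
  | 0, _ => none
  | fuel+1, i =>
    match pvColsA board nRow nCol i nCol.toNat 0 with
    | some r => some r
    | none => pvRowsA board nRow nCol fuel (i+1)

def solution_679_5 (board : List (List String)) : Int :=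
  let nRow : Int := board.length
  let nCol : Int := (board.getD 0 []).length  -- len(board[0]); Pre_ gives board ≠ []
  (pvRowsA board nRow nCol nRow.toNat 0).getD 0

-- ===== PORT B =====
def pvHit (s : String) : Bool := s == "B" || s == "p"

-- `pieces = [x for x in seg if x in ("B","p")]; 1 if pieces and pieces[0]=="p" else 0`
def pvHitFirst (seg : List String) : Int :=
  match seg.filter pvHit with
  | [] => 0
  | x :: _ => if x = "p" then 1 else 0

-- same with pieces[-1]
def pvHitLast (seg : List String) : Int :=
  match (seg.filter pvHit).getLast? with
  | some x => if x = "p" then 1 else 0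
  | none => 0

-- `col = [brow[c] for brow in board]` and the four slice checks; slices row[c+1:], row[:c],
-- col[r+1:], col[:r] with Nat indices are exactly drop/take; brow[c] is in range on Pre_ boards
def pvCaptures (board : List (List String)) (row : List String) (r c : Nat) : Int :=
  let col := board.map (fun brow => brow.getD c "")
  pvHitFirst (row.drop (c+1)) + pvHitLast (row.take c)
    + pvHitFirst (col.drop (r+1)) + pvHitLast (col.take r)

-- `for c in range(len(board[0])): if row[c] == "R": …`
def pvFindC (row : List String) : Nat → Nat → Option Nat
  | _, 0 => none
  | c, fuel+1 => if row.getD c "" = "R" then some c else pvFindC row (c+1) fuel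

-- `for r, row in enumerate(board): …`
def pvFindR (board : List (List String)) (nCol : Nat) : Nat → List (List String) → Int
  | _, [] => 0
  | r, row :: rest =>
    match pvFindC row 0 nCol with
    | some c => pvCaptures board row r c
    | none => pvFindR board nCol (r+1) rest

def solution_679_5_alt (board : List (List String)) : Int :=
  pvFindR board ((board.headD []).length) 0 board

-- ===== PRECONDITION & SPEC =====
-- Pre_ excludes the empty board and the ragged boards A's scans can step off (IndexError on both),
-- plus ragged boards whose over-long rows hold a rook in the first len(board[0]) columns (there A's
-- n_col cut-off silently ignores cells that B's row slices see, an artefact of A's bound; a few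
-- ragged boards on which A happens to return without touching a short row remain excluded too).
def Pre_solution_679_5 (board : List (List String)) : Prop :=
  board ≠ [] ∧ ∀ row ∈ board,
    row.length = (board.headD []).length ∨
    ((board.headD []).length ≤ row.length ∧
      ∀ j : Nat, j < (board.headD []).length → row.getD j "" ≠ "R")
instance (board : List (List String)) : Decidable (Pre_solution_679_5 board) := by
  unfold Pre_solution_679_5; infer_instance

def pvWitness_solution_679_5 : List (List String) :=
  [[".", "R", "p"], ["B", ".", "."], [".", "p", "."]]

def Spec_solution_679_5 (board : List (List String)) (out : Int) : Prop := out = solution_679_5_alt board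
instance (board : List (List String)) (out : Int) : Decidable (Spec_solution_679_5 board out) := by unfold Spec_solution_679_5; infer_instance

-- ===== CLAIM (what is proved, stated in full; the proofs are below) =====
def Claim_equal_solution_679_5 : Prop := ∀ (board : List (List String)), Dom_solution_679_5 board → Pre_solution_679_5 board → Spec_solution_679_5 board (solution_679_5 board)

-- ===== LEMMAS AND PROOFS =====

theorem pvHit_false {s : String} (hB : s ≠ "B") (hp : s ≠ "p") : pvHit s = false := by
  simp [pvHit, hB, hp]

theorem pvHitFirst_ge (row : List String) (k : Nat) (h : row.length ≤ k) :
    pvHitFirst (row.drop k) = 0 := by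
  rw [List.drop_eq_nil_of_le h]; rfl

-- cell access below the rook's row, via board.getD
theorem pvCellA_cast (board : List (List String)) (i k : Nat) :
    pvCellA board (i : Int) (k : Int) = (board.getD i []).getD k "" := by
  simp [pvCellA]

-- RIGHT: the (0,1) walk computes the nearest piece in row[k:]
theorem walkRight (board : List (List String)) (row : List String) (i0 : Nat)
    (hi : i0 < board.length) (hrow : board.getD i0 [] = row)
    (nCol : Int) (hnc : nCol = (row.length : Int)) :
    ∀ (fuel k : Nat) (res : Int), row.length + 1 ≤ fuel + k →
      pvWalkA board (board.length : Int) nCol 0 1 fuel (i0 : Int) (k : Int) res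
        = res + pvHitFirst (row.drop k) := by
  intro fuel
  induction fuel with
  | zero =>
    intro k res hf
    rw [pvHitFirst_ge row k (by omega)]
    simp [pvWalkA]
  | succ f ih =>
    intro k res hf
    rw [pvWalkA]
    by_cases hk : k < row.length
    · rw [if_pos (by push_cast [hnc]; omega)]
      rw [pvCellA_cast, hrow]
      have hget : row.getD k "" = row[k] := List.getD_eq_getElem row "" hk
      have hdrop : row.drop k = row[k] :: row.drop (k+1) := List.drop_eq_getElem_cons hk
      rw [hget, hdrop]
      by_cases hB : row[k] = "B"
      · rw [if_pos hB, hB]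
        simp [pvHitFirst, pvHit]
      · rw [if_neg hB]
        by_cases hp : row[k] = "p"
        · rw [if_pos hp, hp]
          simp [pvHitFirst, pvHit]
        · rw [if_neg hp]
          have hskip : pvHitFirst (row[k] :: row.drop (k+1)) = pvHitFirst (row.drop (k+1)) := by
            unfold pvHitFirst
            rw [List.filter_cons, pvHit_false hB hp]
            simp only [Bool.false_eq_true, if_false]
          rw [hskip]
          have h1 : (i0 : Int) + 0 = (i0 : Int) := by ring
          have h2 : (k : Int) + 1 = ((k + 1 : Nat) : Int) := by push_cast; ring
          rw [h1, h2, ih (k+1) res (by omega)]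
    · rw [if_neg (by push_cast [hnc]; omega)]
      rw [pvHitFirst_ge row k (by omega)]
      ring

theorem pvHitLast_take_succ (row : List String) (k : Nat) (hk : k < row.length)
    (hB : row[k] ≠ "B") (hp : row[k] ≠ "p") :
    pvHitLast (row.take (k+1)) = pvHitLast (row.take k) := by
  rw [List.take_add_one]
  simp only [List.getElem?_eq_getElem hk, Option.toList_some]
  rw [pvHitLast, List.filter_append,
    List.filter_cons_of_neg (by simp [pvHit_false hB hp])]
  simp [pvHitLast]

-- LEFT: the (0,-1) walk computes the nearest piece (from the right) in row[:k+1]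
theorem walkLeft (board : List (List String)) (row : List String) (i0 : Nat)
    (hi : i0 < board.length) (hrow : board.getD i0 [] = row)
    (nCol : Int) (hnc : nCol = (row.length : Int)) :
    ∀ (fuel k : Nat) (res : Int), k + 2 ≤ fuel → k < row.length →
      pvWalkA board (board.length : Int) nCol 0 (-1) fuel (i0 : Int) (k : Int) res
        = res + pvHitLast (row.take (k+1)) := by
  intro fuel
  induction fuel with
  | zero => intro k res hf hk; omega
  | succ f ih =>
    intro k res hf hk
    rw [pvWalkA]
    rw [if_pos (by push_cast [hnc]; omega)]
    rw [pvCellA_cast, hrow]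
    have hget : row.getD k "" = row[k] := List.getD_eq_getElem row "" hk
    rw [hget]
    by_cases hB : row[k] = "B"
    · rw [if_pos hB]
      rw [List.take_add_one]
      simp only [List.getElem?_eq_getElem hk, Option.toList_some]
      rw [pvHitLast, List.filter_append, hB]
      simp [pvHit]
    · rw [if_neg hB]
      by_cases hp : row[k] = "p"
      · rw [if_pos hp]
        rw [List.take_add_one]
        simp only [List.getElem?_eq_getElem hk, Option.toList_some]
        rw [pvHitLast, List.filter_append, hp]
        simp [pvHit]
      · rw [if_neg hp]
        rw [pvHitLast_take_succ row k hk hB hp]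
        match k with
        | 0 =>
          -- next position is column -1: one more unfolding, guard fails
          match f, hf with
          | f'+1, _ =>
            have hneg : ((0:Nat) : Int) + -1 = (-1 : Int) := by ring
            rw [hneg, pvWalkA]
            rw [if_neg (by omega)]
            simp [pvHitLast]
        | k'+1 =>
          have : ((k'+1 : Nat) : Int) + -1 = (k' : Int) := by push_cast; ring
          rw [this]
          have : (i0 : Int) + 0 = (i0 : Int) := by ring
          rw [this, ih k' res (by omega) (by omega)]

-- the rook's column as B builds it
theorem pvColGet (board : List (List String)) (c0 k : Nat) :
    (board.map (fun brow => brow.getD c0 "")).getD k "" = (board.getD k []).getD c0 "" := by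
  by_cases hk : k < board.length
  · rw [List.getD_eq_getElem _ "" (by simpa using hk), List.getD_eq_getElem _ [] hk]
    simp
  · rw [List.getD_eq_default _ "" (by simpa using (by omega : board.length ≤ k)),
      List.getD_eq_default _ [] (by omega)]
    rfl

-- DOWN: the (1,0) walk computes the nearest piece in col[k:]
theorem walkDown (board : List (List String)) (c0 : Nat)
    (nCol : Int) (hc : (c0 : Int) < nCol)
    (col : List String) (hcol : col = board.map (fun brow => brow.getD c0 "")) :
    ∀ (fuel k : Nat) (res : Int), board.length + 1 ≤ fuel + k →
      pvWalkA board (board.length : Int) nCol 1 0 fuel (k : Int) (c0 : Int) res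
        = res + pvHitFirst (col.drop k) := by
  have hlen : col.length = board.length := by rw [hcol]; simp
  intro fuel
  induction fuel with
  | zero =>
    intro k res hf
    rw [pvHitFirst_ge col k (by omega)]
    simp [pvWalkA]
  | succ f ih =>
    intro k res hf
    rw [pvWalkA]
    by_cases hk : k < board.length
    · rw [if_pos (by push_cast; omega)]
      have hcell : pvCellA board (k : Int) (c0 : Int) = col[k]'(by omega) := by
        rw [pvCellA_cast, ← pvColGet board c0 k, ← hcol,
          List.getD_eq_getElem col "" (by omega)]
      rw [hcell]
      have hdrop : col.drop k = col[k]'(by omega) :: col.drop (k+1) :=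
        List.drop_eq_getElem_cons (by omega)
      rw [hdrop]
      by_cases hB : col[k]'(by omega) = "B"
      · rw [if_pos hB, hB]; simp [pvHitFirst, pvHit]
      · rw [if_neg hB]
        by_cases hp : col[k]'(by omega) = "p"
        · rw [if_pos hp, hp]; simp [pvHitFirst, pvHit]
        · rw [if_neg hp]
          have hskip : pvHitFirst (col[k]'(by omega) :: col.drop (k+1)) = pvHitFirst (col.drop (k+1)) := by
            unfold pvHitFirst
            rw [List.filter_cons, pvHit_false hB hp]
            simp only [Bool.false_eq_true, if_false]
          rw [hskip]
          have h1 : (c0 : Int) + 0 = (c0 : Int) := by ring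
          have h2 : (k : Int) + 1 = ((k + 1 : Nat) : Int) := by push_cast; ring
          rw [h1, h2, ih (k+1) res (by omega)]
    · rw [if_neg (by push_cast; omega)]
      rw [pvHitFirst_ge col k (by omega)]
      ring

-- UP: the (-1,0) walk computes the nearest piece (from below) in col[:k+1]
theorem walkUp (board : List (List String)) (c0 : Nat)
    (nCol : Int) (hc : (c0 : Int) < nCol)
    (col : List String) (hcol : col = board.map (fun brow => brow.getD c0 "")) :
    ∀ (fuel k : Nat) (res : Int), k + 2 ≤ fuel → k < board.length →
      pvWalkA board (board.length : Int) nCol (-1) 0 fuel (k : Int) (c0 : Int) res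
        = res + pvHitLast (col.take (k+1)) := by
  have hlen : col.length = board.length := by rw [hcol]; simp
  intro fuel
  induction fuel with
  | zero => intro k res hf hk; omega
  | succ f ih =>
    intro k res hf hk
    rw [pvWalkA]
    rw [if_pos (by push_cast; omega)]
    have hcell : pvCellA board (k : Int) (c0 : Int) = col[k]'(by omega) := by
      rw [pvCellA_cast, ← pvColGet board c0 k, ← hcol,
        List.getD_eq_getElem col "" (by omega)]
    rw [hcell]
    by_cases hB : col[k]'(by omega) = "B"
    · rw [if_pos hB]
      rw [List.take_add_one]
      simp only [List.getElem?_eq_getElem (show k < col.length by omega), Option.toList_some]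
      rw [pvHitLast, List.filter_append, hB]
      simp [pvHit]
    · rw [if_neg hB]
      by_cases hp : col[k]'(by omega) = "p"
      · rw [if_pos hp]
        rw [List.take_add_one]
        simp only [List.getElem?_eq_getElem (show k < col.length by omega), Option.toList_some]
        rw [pvHitLast, List.filter_append, hp]
        simp [pvHit]
      · rw [if_neg hp]
        rw [pvHitLast_take_succ col k (by omega) hB hp]
        match k with
        | 0 =>
          match f, hf with
          | f'+1, _ =>
            have hneg : ((0:Nat) : Int) + -1 = (-1 : Int) := by ring
            rw [hneg, pvWalkA]
            rw [if_neg (by omega)]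
            simp [pvHitLast]
        | k'+1 =>
          have : ((k'+1 : Nat) : Int) + -1 = (k' : Int) := by push_cast; ring
          rw [this]
          have : (c0 : Int) + 0 = (c0 : Int) := by ring
          rw [this, ih k' res (by omega) (by omega)]

-- the four-direction fold at the rook equals B's four slice checks
theorem dirsEq (board : List (List String)) (row : List String) (r0 c0 : Nat) (nCol : Int)
    (hr : r0 < board.length) (hrow : board.getD r0 [] = row)
    (hnc : nCol = (row.length : Int)) (hR : row.getD c0 "" = "R") :
    pvDirsA board (board.length : Int) nCol (r0 : Int) (c0 : Int) = pvCaptures board row r0 c0 := by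
  have hc0 : c0 < row.length := by
    by_contra h
    rw [List.getD_eq_default _ "" (by omega)] at hR
    exact absurd hR (by decide)
  have hgetR : row[c0] = "R" := by rw [← List.getD_eq_getElem row "" hc0]; exact hR
  have hcl : (board.map (fun brow => brow.getD c0 "")).length = board.length := by simp
  have hcolR : (board.map (fun brow => brow.getD c0 ""))[r0]'(by omega) = "R" := by
    rw [← List.getD_eq_getElem _ "" (by omega), pvColGet, hrow]
    exact hR
  have hF : ((board.length : Int) + nCol).toNat + 1 = board.length + row.length + 1 := by
    rw [hnc]; omega
  unfold pvDirsA
  simp only [List.foldl_cons, List.foldl_nil]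
  rw [hF]
  rw [walkRight board row r0 hr hrow nCol hnc _ c0 0 (by omega)]
  rw [walkLeft board row r0 hr hrow nCol hnc _ c0 _ (by omega) hc0]
  rw [walkUp board c0 nCol (by rw [hnc]; exact_mod_cast hc0) _ rfl _ r0 _ (by omega) hr]
  rw [walkDown board c0 nCol (by rw [hnc]; exact_mod_cast hc0) _ rfl _ r0 _ (by omega)]
  -- step over the rook cell itself in each of the four lines
  have e1 : pvHitFirst (row.drop c0) = pvHitFirst (row.drop (c0+1)) := by
    rw [List.drop_eq_getElem_cons hc0]
    unfold pvHitFirst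
    rw [List.filter_cons, pvHit_false (by rw [hgetR]; decide) (by rw [hgetR]; decide)]
    simp only [Bool.false_eq_true, if_false]
  have e2 : pvHitLast (row.take (c0+1)) = pvHitLast (row.take c0) :=
    pvHitLast_take_succ row c0 hc0 (by rw [hgetR]; decide) (by rw [hgetR]; decide)
  have e3 : pvHitLast ((board.map (fun brow => brow.getD c0 "")).take (r0+1))
      = pvHitLast ((board.map (fun brow => brow.getD c0 "")).take r0) :=
    pvHitLast_take_succ _ r0 (by omega) (by rw [hcolR]; decide) (by rw [hcolR]; decide)
  have e4 : pvHitFirst ((board.map (fun brow => brow.getD c0 "")).drop r0)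
      = pvHitFirst ((board.map (fun brow => brow.getD c0 "")).drop (r0+1)) := by
    rw [List.drop_eq_getElem_cons (by omega : r0 < (board.map (fun brow => brow.getD c0 "")).length)]
    unfold pvHitFirst
    rw [List.filter_cons, pvHit_false (by rw [hcolR]; decide) (by rw [hcolR]; decide)]
    simp only [Bool.false_eq_true, if_false]
  rw [e1, e2, e3, e4]
  unfold pvCaptures
  ring

theorem findC_lt (row : List String) :
    ∀ (fuel j c : Nat), pvFindC row j fuel = some c → c < j + fuel := by
  intro fuel
  induction fuel with
  | zero => intro j c h; cases h
  | succ f ih =>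
    intro j c h
    rw [pvFindC] at h
    by_cases hR : row.getD j "" = "R"
    · rw [if_pos hR] at h; cases h; omega
    · rw [if_neg hR] at h
      have := ih (j+1) c h
      omega

theorem findC_found (row : List String) :
    ∀ (fuel j c : Nat), pvFindC row j fuel = some c → row.getD c "" = "R" := by
  intro fuel
  induction fuel with
  | zero => intro j c h; cases h
  | succ f ih =>
    intro j c h
    rw [pvFindC] at h
    by_cases hR : row.getD j "" = "R"
    · rw [if_pos hR] at h; cases h; exact hR
    · rw [if_neg hR] at h; exact ih (j+1) c h

-- A's inner column loop equals B's find-the-rook loop (then both apply their counters)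
theorem colsEq (board : List (List String)) (row : List String) (r0 : Nat)
    (hrow : board.getD r0 [] = row) (nCol : Int) :
    ∀ (fuel j : Nat),
      pvColsA board (board.length : Int) nCol (r0 : Int) fuel (j : Int)
        = (pvFindC row j fuel).map
            (fun c => pvDirsA board (board.length : Int) nCol (r0 : Int) (c : Int)) := by
  intro fuel
  induction fuel with
  | zero => intro j; rfl
  | succ f ih =>
    intro j
    rw [pvColsA, pvFindC, pvCellA_cast, hrow]
    by_cases hR : row.getD j "" = "R"
    · rw [if_pos hR, if_pos hR]; rfl
    · rw [if_neg hR, if_neg hR]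
      have : (j : Int) + 1 = ((j + 1 : Nat) : Int) := by push_cast; ring
      rw [this, ih (j+1)]

-- A's outer row loop equals B's structural recursion over the rows
theorem rowsEq (board : List (List String)) (nCol : Int)
    (hnc : nCol = ((board.getD 0 []).length : Int))
    (rect : ∀ rw ∈ board, rw.length = (board.headD []).length ∨
      ((board.headD []).length ≤ rw.length ∧
        ∀ j : Nat, j < (board.headD []).length → rw.getD j "" ≠ "R")) :
    ∀ (rest : List (List String)) (r : Nat), board.drop r = rest →
      (pvRowsA board (board.length : Int) nCol rest.length (r : Int)).getD 0
        = pvFindR board ((board.headD []).length) r rest := by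
  intro rest
  induction rest with
  | nil => intro r h; rfl
  | cons rowx rest' ih =>
    intro r hdrop
    have hget? : board[r]? = some rowx := by
      have h : (board.drop r)[0]? = board[r + 0]? := List.getElem?_drop
      rw [hdrop] at h
      simpa using h.symm
    have hr : r < board.length := by
      by_contra h
      rw [List.getElem?_eq_none (by omega)] at hget?
      cases hget?
    have hrowD : board.getD r [] = rowx := by
      rw [List.getD_eq_getElem?_getD, hget?]; rfl
    have hdisj := rect rowx (List.mem_of_getElem? hget?)
    have hhead : board.getD 0 [] = board.headD [] := by
      cases board with
      | nil => simp at hr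
      | cons b bs => rfl
    have htn : nCol.toNat = (board.headD []).length := by
      rw [hnc, hhead]; omega
    simp only [List.length_cons]
    rw [pvRowsA, pvFindR, htn]
    have hz : (0 : Int) = ((0 : Nat) : Int) := rfl
    rw [hz, colsEq board rowx r hrowD nCol ((board.headD []).length) 0]
    cases hfc : pvFindC rowx 0 ((board.headD []).length) with
    | some c =>
      simp only [Option.map_some, Option.getD_some]
      have hRc : rowx.getD c "" = "R" := findC_found rowx _ 0 c hfc
      have hclt : c < (board.headD []).length := by
        have := findC_lt rowx _ 0 c hfc; omega
      have hlenx : rowx.length = (board.headD []).length := by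
        rcases hdisj with h | ⟨_, hnoR⟩
        · exact h
        · exact absurd hRc (hnoR c hclt)
      exact dirsEq board rowx r c nCol hr hrowD
        (by rw [hnc, hhead]; exact_mod_cast hlenx.symm)
        hRc
    | none =>
      simp only [Option.map_none]
      have hcast : (r : Int) + 1 = ((r + 1 : Nat) : Int) := by push_cast; ring
      rw [hcast]
      exact ih (r+1) (by rw [← List.tail_drop, hdrop]; rfl)

-- ===== VERDICT (by name: the statement is the Claim_ definition above) =====
theorem solution_679_5_spec : Claim_equal_solution_679_5 := by
  intro board _ hpre
  obtain ⟨hne, rect⟩ := hpre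
  unfold Spec_solution_679_5 solution_679_5 solution_679_5_alt
  have h := rowsEq board ((board.getD 0 []).length : Int) rfl rect board 0 (by simp)
  simpa using h
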